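-- pv_equiv track=rewrite | github.com/Coach257/ChEF | metric/desiderata.py | infer_option
-- ===== SOURCE A (Python) =====
-- def infer_option(answer,item_choices):
--     def get_unit_option(splits, choices='ABCD', prefix='', suffix=''):
--         res = None
--         for c in choices:
--             if prefix + c + suffix in splits:
--                 if res is None:
--                     res = c
--                 else:
--                     return None
--         return res
--     splits = [x.strip() for x in answer.split()]
--
--     # no prefix match
--     no_prefix_option = get_unit_option(splits, item_choices)
--     if no_prefix_option is not None and no_prefix_option != 'A':
--         return no_prefix_option
--
--     # prefix match
--     tups = [('(', ')'), ('(', ').'), ('', '.'), ('', ','), ('', ':'), ('', ')'), ('', ').'),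
--             (':', ''), (':', ','), (':', '.'), (':', ')'), (':', ').')]
--     for tup in tups:
--         prefix_option = get_unit_option(splits, item_choices, prefix=tup[0], suffix=tup[1])
--         if prefix_option is not None:
--             return prefix_option
--     return None
-- ===== SOURCE B (Python) =====
-- def infer_option(answer, item_choices):
--     # One-shot index:  decorated-token -> [(format_rank, choice_char), ...] built once,
--     # then a single pass over the distinct answer tokens; resolve by format priority.
--     FORMATS = [('', ''), ('(', ')'), ('(', ').'), ('', '.'), ('', ','), ('', ':'),
--                ('', ')'), ('', ').'), (':', ''), (':', ','), (':', '.'), (':', ')'), (':', ').')]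
--     table = {}
--     rank = 0
--     for p, s in FORMATS:
--         for c in item_choices:
--             table.setdefault(p + c + s, []).append((rank, c))
--         rank += 1
--     found = {}
--     for tok in dict.fromkeys(answer.split()):
--         for rank, c in table.get(tok, []):
--             found.setdefault(rank, []).append(c)
--     hits0 = found.get(0, [])
--     if len(hits0) == 1 and hits0[0] != 'A':
--         return hits0[0]
--     for rank in range(1, len(FORMATS)):
--         hits = found.get(rank, [])
--         if len(hits) == 1:
--             return hits[0]
--     return None
-- ===== Notes on version B (the rewrite author's own statement) =====
-- stated objective: alternative
-- what changed: Replaces the 13 per-format rescans of the token list with a lookup table (decorated string -> (format rank, choice)) built once, a single pass over the distinct answer tokens accumulating hits per rank, and a priority resolution over the ranks.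
import Mathlib
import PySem

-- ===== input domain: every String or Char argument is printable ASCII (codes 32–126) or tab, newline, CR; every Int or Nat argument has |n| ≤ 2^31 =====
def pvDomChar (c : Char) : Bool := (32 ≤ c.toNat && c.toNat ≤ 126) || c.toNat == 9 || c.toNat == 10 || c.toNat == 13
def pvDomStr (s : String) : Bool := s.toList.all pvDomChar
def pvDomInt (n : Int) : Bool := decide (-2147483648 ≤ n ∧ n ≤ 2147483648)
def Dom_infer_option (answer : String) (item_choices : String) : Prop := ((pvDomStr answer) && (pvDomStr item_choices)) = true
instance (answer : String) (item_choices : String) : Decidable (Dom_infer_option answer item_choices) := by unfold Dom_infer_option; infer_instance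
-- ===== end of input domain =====

-- B replaces A's 13 per-format rescans of the token list with a lookup table built once,
-- one pass over the distinct answer tokens, and a priority resolution over format ranks (alternative decomposition).

-- ===== PORT A =====
-- get_unit_option's loop over the choice characters, with the running `res` accumulator
def pvGetUnitAux (splits : List String) (pre suf : String) : List Char → Option Char → Option Char
  | [], res => res
  | c :: cs, res =>
    if splits.contains (pre ++ c.toString ++ suf) then
      match res with
      | none => pvGetUnitAux splits pre suf cs (some c)
      | some _ => none
    else pvGetUnitAux splits pre suf cs res

def pvGetUnit (splits : List String) (choices : String) (pre suf : String) : Option Char :=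
  pvGetUnitAux splits pre suf choices.toList none

def pvTups : List (String × String) :=
  [("(", ")"), ("(", ")."), ("", "."), ("", ","), ("", ":"), ("", ")"), ("", ")."),
   (":", ""), (":", ","), (":", "."), (":", ")"), (":", ").")]

-- the `for tup in tups` loop with its early return
def pvTryTups (splits : List String) (choices : String) : List (String × String) → Option String
  | [] => none
  | (p, s) :: rest =>
    match pvGetUnit splits choices p s with
    | some c => some c.toString
    | none => pvTryTups splits choices rest

def infer_option (answer : String) (item_choices : String) : Option String :=
  let splits := (PySem.Str.split₀ answer).map PySem.Str.strip
  match pvGetUnit splits item_choices "" "" with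
  | some c => if c ≠ 'A' then some c.toString else pvTryTups splits item_choices pvTups
  | none => pvTryTups splits item_choices pvTups

-- ===== PORT B =====
def pvFormats : List (String × String) :=
  [("", ""), ("(", ")"), ("(", ")."), ("", "."), ("", ","), ("", ":"), ("", ")"), ("", ")."),
   (":", ""), (":", ","), (":", "."), (":", ")"), (":", ").")]

-- table.setdefault(p+c+s, []).append((rank, c)) over all formats and choice chars
def pvTable (chars : List Char) : PySem.Dict String (List (Int × Char)) :=
  (PySem.List.enumerate pvFormats 0).foldl
    (fun t rps =>
      chars.foldl (fun t c =>
        t.modify (rps.2.1 ++ c.toString ++ rps.2.2) [] (fun l => l ++ [(rps.1, c)])) t)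
    PySem.Dict.empty

-- found.setdefault(rank, []).append(c) over the distinct tokens and their table entries
def pvFound (table : PySem.Dict String (List (Int × Char))) (toks : List String) :
    PySem.Dict Int (List Char) :=
  toks.foldl
    (fun f tok => (table.getD tok []).foldl (fun f rc => f.modify rc.1 [] (fun l => l ++ [rc.2])) f)
    PySem.Dict.empty

-- the `for rank in range(1, len(FORMATS))` resolution loop
def pvResolve (found : PySem.Dict Int (List Char)) : List Int → Option String
  | [] => none
  | r :: rs =>
    match found.getD r [] with
    | [c] => some c.toString
    | _ => pvResolve found rs

def infer_option_alt (answer : String) (item_choices : String) : Option String :=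
  let toks := PySem.List.dedup (PySem.Str.split₀ answer)
  let found := pvFound (pvTable item_choices.toList) toks
  -- `if len(hits0) == 1 and hits0[0] != 'A'` ported as a match on the (guarded-singleton) list
  match found.getD 0 [] with
  | [c] => if c ≠ 'A' then some c.toString else pvResolve found (PySem.List.pyRange 1 13 1)
  | _ => pvResolve found (PySem.List.pyRange 1 13 1)

-- ===== PRECONDITION & SPEC =====
def Spec_infer_option (answer : String) (item_choices : String) (out : Option String) : Prop := out = infer_option_alt answer item_choices
instance (answer : String) (item_choices : String) (out : Option String) : Decidable (Spec_infer_option answer item_choices out) := by unfold Spec_infer_option; infer_instance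

-- ===== CLAIM (what is proved, stated in full; the proofs are below) =====
def Claim_equal_infer_option : Prop := ∀ (answer : String) (item_choices : String), Dom_infer_option answer item_choices → Spec_infer_option answer item_choices (infer_option answer item_choices)

-- ===== LEMMAS AND PROOFS =====

-- `pvSing l` = the unique element of l if l is a singleton (the value both resolutions branch on)
def pvSing : List Char → Option Char
  | [c] => some c
  | _ => none

-- the characterization both sides reduce to: choice chars whose decorated form is a token
def pvMatched (splits : List String) (chars : List Char) (p s : String) : List Char :=
  chars.filter (fun c => splits.contains (p ++ c.toString ++ s))

theorem pvBeqDecide {α : Type} [BEq α] [LawfulBEq α] [DecidableEq α] (a b : α) :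
    (a == b) = decide (a = b) := by
  cases h : decide (a = b)
  · simp at h; simp [h]
  · simp at h; simp [h]

theorem pvGetUnitAux_some (splits : List String) (pre suf : String) (cs : List Char) (a : Char) :
    pvGetUnitAux splits pre suf cs (some a) =
      match cs.filter (fun c => splits.contains (pre ++ c.toString ++ suf)) with
      | [] => some a
      | _ => none := by
  induction cs generalizing a with
  | nil => simp [pvGetUnitAux]
  | cons c cs ih =>
    simp only [pvGetUnitAux, List.filter_cons]
    by_cases h : pre.push c ++ suf ∈ splits
    · simp [h]
    · simp [h, ih]

theorem pvGetUnitAux_none (splits : List String) (pre suf : String) (cs : List Char) :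
    pvGetUnitAux splits pre suf cs none =
      pvSing (cs.filter (fun c => splits.contains (pre ++ c.toString ++ suf))) := by
  induction cs with
  | nil => simp [pvGetUnitAux, pvSing]
  | cons c cs ih =>
    simp only [pvGetUnitAux, List.filter_cons]
    by_cases h : pre.push c ++ suf ∈ splits
    · simp only [pvGetUnitAux_some]
      cases hf : cs.filter (fun c => splits.contains (pre ++ c.toString ++ suf)) <;>
        simp [h, hf, pvSing]
    · simp [h, ih]

theorem pvGetUnit_eq (splits : List String) (choices : String) (p s : String) :
    pvGetUnit splits choices p s = pvSing (pvMatched splits choices.toList p s) := by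
  simp [pvGetUnit, pvMatched, pvGetUnitAux_none]

theorem pvSing_perm {l l' : List Char} (h : l.Perm l') : pvSing l = pvSing l' := by
  match l, l' with
  | [], l' => rw [List.Perm.nil_eq h]
  | [a], l' =>
    rw [List.perm_singleton.mp h.symm]
  | a :: b :: t, [] => exact absurd h.length_eq (by simp)
  | a :: b :: t, [x] => exact absurd h.length_eq (by simp)
  | a :: b :: t, x :: y :: u => simp [pvSing]

-- all tokens produced by split() consist of non-whitespace characters
theorem pvSplitGo_nonspace (s cur : List Char) (acc : List (List Char))
    (hcur : ∀ c ∈ cur, PySem.Chars.isspace c = false)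
    (hacc : ∀ t ∈ acc, ∀ c ∈ t, PySem.Chars.isspace c = false) :
    ∀ t ∈ PySem.Chars.split₀.go s cur acc, ∀ c ∈ t, PySem.Chars.isspace c = false := by
  induction s generalizing cur acc with
  | nil =>
    intro t ht
    unfold PySem.Chars.split₀.go at ht
    by_cases h : cur.isEmpty = true
    · rw [if_pos h, List.mem_reverse] at ht; exact hacc t ht
    · rw [if_neg h, List.mem_reverse, List.mem_cons] at ht
      rcases ht with h1 | h2
      · subst h1; intro c hc; exact hcur c (by simpa using hc)
      · exact hacc t h2
  | cons c rest ih =>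
    intro t ht
    unfold PySem.Chars.split₀.go at ht
    by_cases hs : PySem.Chars.isspace c = true
    · rw [if_pos hs] at ht
      by_cases he : cur.isEmpty = true
      · rw [if_pos he] at ht
        exact ih [] acc (by simp) hacc t ht
      · rw [if_neg he] at ht
        refine ih [] (cur.reverse :: acc) (by simp) ?_ t ht
        intro u hu
        rcases List.mem_cons.mp hu with h1 | h2
        · subst h1; intro d hd; exact hcur d (by simpa using hd)
        · exact hacc u h2
    · rw [if_neg hs] at ht
      refine ih (c :: cur) acc ?_ hacc t ht
      intro d hd
      rcases List.mem_cons.mp hd with h1 | h2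
      · subst h1; simpa using hs
      · exact hcur d h2

theorem pvStrip_nonspace (l : List Char) (h : ∀ c ∈ l, PySem.Chars.isspace c = false) :
    PySem.Chars.strip l = l := by
  unfold PySem.Chars.strip PySem.Chars.rstrip PySem.Chars.lstrip
  have h1 : List.dropWhile PySem.Chars.isspace l = l := by
    cases l with
    | nil => rfl
    | cons c t => rw [List.dropWhile_cons_of_neg (by simp [h c (by simp)])]
  rw [h1]
  cases hr : l.reverse with
  | nil => simpa using congrArg List.reverse hr
  | cons c t =>
    rw [List.dropWhile_cons_of_neg, ← hr, List.reverse_reverse]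
    have : c ∈ l := by rw [← List.mem_reverse, hr]; simp
    simp [h c this]

theorem pvMapStrip_split (answer : String) :
    (PySem.Str.split₀ answer).map PySem.Str.strip = PySem.Str.split₀ answer := by
  have key : ∀ t ∈ PySem.Chars.split₀ answer.toList, ∀ c ∈ t, PySem.Chars.isspace c = false := by
    intro t ht
    exact pvSplitGo_nonspace answer.toList [] [] (by simp) (by simp) t ht
  apply List.ext_getElem (by simp)
  intro i h1 h2
  rw [List.getElem_map, ← String.toList_inj, PySem.Str.toList_strip]
  have hmem : (PySem.Str.split₀ answer)[i].toList ∈ PySem.Chars.split₀ answer.toList := by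
    rw [← PySem.Str.split₀_map_toList]
    exact List.mem_map_of_mem (List.getElem_mem _)
  exact pvStrip_nonspace _ (key _ hmem)

-- generic 'setdefault(k, []).append(v)' fold: the list stored at a key afterwards
theorem pvFoldlModify {α κ ν : Type} [BEq κ] [LawfulBEq κ] [DecidableEq κ]
    (xs : List α) (key : α → κ) (val : α → ν) (d : PySem.Dict κ (List ν)) (k : κ) :
    (xs.foldl (fun t x => t.modify (key x) [] (fun l => l ++ [val x])) d).getD k []
      = d.getD k [] ++ (xs.filter (fun x => key x = k)).map val := by
  induction xs generalizing d with
  | nil => simp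
  | cons x xs ih =>
    simp only [List.foldl_cons, List.filter_cons]
    by_cases h : key x = k
    · subst h
      rw [ih, PySem.Dict.getD_modify_self]
      simp
    · rw [ih, PySem.Dict.getD_modify_of_ne _ _ _ (Ne.symm h)]
      simp [h]

theorem pvFoldlFoldl {α β γ : Type} (xs : List α) (g : α → List β) (f : γ → β → γ) (init : γ) :
    xs.foldl (fun acc x => (g x).foldl f acc) init = (xs.flatMap g).foldl f init := by
  induction xs generalizing init with
  | nil => simp
  | cons x xs ih => simp [List.foldl_append, ih]

theorem pvTable_getD (chars : List Char) (tok : String) :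
    (pvTable chars).getD tok []
      = (PySem.List.enumerate pvFormats 0).flatMap
          (fun rps => (chars.filter (fun c => rps.2.1 ++ c.toString ++ rps.2.2 = tok)).map
            (fun c => (rps.1, c))) := by
  unfold pvTable
  rw [show (fun (t : PySem.Dict String (List (Int × Char))) (rps : Int × String × String) =>
        chars.foldl (fun t c => t.modify (rps.2.1 ++ c.toString ++ rps.2.2) [] (fun l => l ++ [(rps.1, c)])) t)
      = (fun t rps => ((chars.map (fun c => (rps, c))).foldl
          (fun t e => t.modify (e.1.2.1 ++ e.2.toString ++ e.1.2.2) [] (fun l => l ++ [(e.1.1, e.2)])) t)) by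
      funext t rps; rw [List.foldl_map]]
  rw [pvFoldlFoldl, pvFoldlModify (α := (Int × String × String) × Char) _ (fun e => e.1.2.1 ++ e.2.toString ++ e.1.2.2) (fun e => (e.1.1, e.2))]
  simp only [PySem.Dict.getD_empty, List.nil_append, List.filter_flatMap, List.filter_map,
    List.map_flatMap, List.map_map]
  apply List.flatMap_congr
  intro rps _
  simp [Function.comp_def]

theorem pvFound_getD (table : PySem.Dict String (List (Int × Char))) (toks : List String) (r : Int) :
    (pvFound table toks).getD r []
      = toks.flatMap (fun tok => ((table.getD tok []).filter (fun rc => rc.1 = r)).map (·.2)) := by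
  unfold pvFound
  rw [pvFoldlFoldl, pvFoldlModify (α := Int × Char) _ (fun rc => rc.1) (fun rc => rc.2)]
  simp [List.filter_flatMap, List.map_flatMap]

-- per-rank slice of the table entries, for a rank that occurs once among the formats
theorem pvAux1 (fs : List (Int × String × String)) (chars : List Char) (tok : String) (r : Int) :
    ((fs.flatMap (fun rps => (chars.filter (fun c => rps.2.1 ++ c.toString ++ rps.2.2 = tok)).map
        (fun c => (rps.1, c)))).filter (fun e => e.1 = r)).map (·.2)
      = (fs.filter (fun rps => rps.1 = r)).flatMap
          (fun rps => chars.filter (fun c => rps.2.1 ++ c.toString ++ rps.2.2 = tok)) := by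
  induction fs with
  | nil => simp
  | cons rps fs ih =>
    simp only [List.flatMap_cons, List.filter_append, List.map_append, ih, List.filter_cons]
    by_cases h : rps.1 = r
    · simp [h, List.filter_map, Function.comp_def]
    · simp [h, List.filter_map, Function.comp_def]

theorem pvFoundAt (chars : List Char) (toks : List String) (r : Int) (p s : String)
    (hr : (PySem.List.enumerate pvFormats 0).filter (fun rps => rps.1 = r) = [(r, (p, s))]) :
    (pvFound (pvTable chars) toks).getD r []
      = toks.flatMap (fun tok => chars.filter (fun c => p ++ c.toString ++ s = tok)) := by
  rw [pvFound_getD]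
  apply List.flatMap_congr
  intro tok _
  rw [pvTable_getD, pvAux1, hr]
  simp

-- filter by a disjunction of disjoint predicates, up to permutation
theorem pvFilterOr (p q : Char → Bool) (hd : ∀ c, ¬(p c = true ∧ q c = true)) (chars : List Char) :
    (chars.filter (fun c => p c || q c)).Perm (chars.filter p ++ chars.filter q) := by
  induction chars with
  | nil => simp
  | cons c cs ih =>
    by_cases hp : p c = true
    · have hq : q c = false := by
        cases hq : q c
        · rfl
        · exact absurd ⟨hp, hq⟩ (hd c)
      simpa [hp, hq] using ih.cons c
    · by_cases hq : q c = true
      · simp only [List.filter_cons, hp, hq]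
        simp only [Bool.false_or]
        exact (ih.cons c).trans List.perm_middle.symm
      · simp only [List.filter_cons]
        simpa [hp, hq] using ih

theorem pvPermMatched (toks : List String) (chars : List Char) (deco : Char → String)
    (h : toks.Nodup) :
    (toks.flatMap (fun tok => chars.filter (fun c => deco c = tok))).Perm
      (chars.filter (fun c => toks.contains (deco c))) := by
  induction toks with
  | nil => simp
  | cons t ts ih =>
    simp only [List.flatMap_cons, List.nodup_cons] at *
    have step := pvFilterOr (fun c => deco c == t) (fun c => ts.contains (deco c))
      (fun c hc => by
        have h1 : deco c = t := by simpa using hc.1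
        have h2 : deco c ∈ ts := by simpa using hc.2
        exact h.1 (h1 ▸ h2)) chars
    have : (chars.filter (fun c => (t :: ts).contains (deco c)))
        = chars.filter (fun c => (deco c == t) || ts.contains (deco c)) := by
      apply List.filter_congr
      intro c _
      simp [pvBeqDecide]
    rw [this]
    have hb : (chars.filter (fun c => decide (deco c = t)))
        = chars.filter (fun c => deco c == t) := by
      apply List.filter_congr
      intro c _
      rw [pvBeqDecide]
    refine List.Perm.trans ?_ step.symm
    rw [← hb]
    exact List.Perm.append_left _ (ih h.2)

theorem pvContainsDedup {α : Type} [BEq α] [LawfulBEq α] (xs : List α) (y : α) :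
    (PySem.List.dedup xs).contains y = xs.contains y := by
  by_cases h : y ∈ xs <;> simp [h]

-- the two branch shapes shared by both resolutions
def pvStep (o : Option Char) (rest : Option String) : Option String :=
  match o with | some c => some c.toString | none => rest

def pvStep0 (o : Option Char) (rest : Option String) : Option String :=
  match o with | some c => if c ≠ 'A' then some c.toString else rest | none => rest

theorem pvKey (answer item_choices : String) (r : Int) (p s : String)
    (hr : (PySem.List.enumerate pvFormats 0).filter (fun rps => rps.1 = r) = [(r, (p, s))]) :
    pvSing ((pvFound (pvTable item_choices.toList)
        (PySem.List.dedup (PySem.Str.split₀ answer))).getD r [])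
      = pvSing (pvMatched ((PySem.Str.split₀ answer).map PySem.Str.strip) item_choices.toList p s) := by
  rw [pvMapStrip_split]
  apply pvSing_perm
  rw [pvFoundAt _ _ r p s hr]
  have hperm := pvPermMatched (PySem.List.dedup (PySem.Str.split₀ answer)) item_choices.toList
    (fun c => p ++ c.toString ++ s) (PySem.List.nodup_dedup _)
  refine hperm.trans (List.Perm.of_eq ?_)
  apply List.filter_congr
  intro c _
  rw [pvContainsDedup]

theorem pvResolve_cons (found : PySem.Dict Int (List Char)) (r : Int) (rs : List Int) :
    pvResolve found (r :: rs) = pvStep (pvSing (found.getD r [])) (pvResolve found rs) := by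
  simp only [pvResolve]
  cases h : found.getD r [] with
  | nil => rfl
  | cons a t => cases t <;> rfl

theorem pvTryTups_cons (SP : List String) (i : String) (p s : String) (rest : List (String × String)) :
    pvTryTups SP i ((p, s) :: rest) = pvStep (pvSing (pvMatched SP i.toList p s)) (pvTryTups SP i rest) := by
  simp only [pvTryTups, pvGetUnit_eq]
  cases pvSing (pvMatched SP i.toList p s) <;> rfl

theorem pvTryTups_nil (SP : List String) (i : String) : pvTryTups SP i [] = none := rfl

theorem pvResolve_nil (found : PySem.Dict Int (List Char)) : pvResolve found [] = none := rfl

theorem pvA_top (answer item_choices : String) :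
    infer_option answer item_choices
      = pvStep0 (pvSing (pvMatched ((PySem.Str.split₀ answer).map PySem.Str.strip) item_choices.toList "" ""))
          (pvTryTups ((PySem.Str.split₀ answer).map PySem.Str.strip) item_choices pvTups) := by
  simp only [infer_option, pvGetUnit_eq]
  cases pvSing (pvMatched ((PySem.Str.split₀ answer).map PySem.Str.strip) item_choices.toList "" "") <;> rfl

theorem pvB_top (answer item_choices : String) :
    infer_option_alt answer item_choices
      = pvStep0 (pvSing ((pvFound (pvTable item_choices.toList)
            (PySem.List.dedup (PySem.Str.split₀ answer))).getD 0 []))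
          (pvResolve (pvFound (pvTable item_choices.toList)
            (PySem.List.dedup (PySem.Str.split₀ answer))) (PySem.List.pyRange 1 13 1)) := by
  simp only [infer_option_alt]
  cases h : (pvFound (pvTable item_choices.toList)
      (PySem.List.dedup (PySem.Str.split₀ answer))).getD 0 [] with
  | nil => rfl
  | cons a t => cases t <;> rfl

-- ===== VERDICT (by name: the statement is the Claim_ definition above) =====
theorem infer_option_spec : Claim_equal_infer_option := by
  intro answer item_choices _
  show infer_option answer item_choices = infer_option_alt answer item_choices
  have hpyr : PySem.List.pyRange 1 13 1 = [1, 2, 3, 4, 5, 6, 7, 8, 9, 10, 11, 12] := by decide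
  have E := pvKey answer item_choices
  have E0 := E 0 "" "" (by decide)
  have E1 := E 1 "(" ")" (by decide)
  have E2 := E 2 "(" ")." (by decide)
  have E3 := E 3 "" "." (by decide)
  have E4 := E 4 "" "," (by decide)
  have E5 := E 5 "" ":" (by decide)
  have E6 := E 6 "" ")" (by decide)
  have E7 := E 7 "" ")." (by decide)
  have E8 := E 8 ":" "" (by decide)
  have E9 := E 9 ":" "," (by decide)
  have E10 := E 10 ":" "." (by decide)
  have E11 := E 11 ":" ")" (by decide)
  have E12 := E 12 ":" ")." (by decide)
  rw [pvA_top, pvB_top, hpyr, E0]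
  congr 1
  simp only [pvTups, pvTryTups_cons, pvResolve_cons, E1, E2, E3, E4, E5, E6, E7, E8, E9, E10,
    E11, E12, pvTryTups_nil, pvResolve_nil]
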